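-- pv_equiv track=rewrite | github.com/srkjs/Coding-Interview | Amazon/Password Strength/passwordStrength.py | passwordStrength2
-- ===== SOURCE A (Python) =====
-- def passwordStrength2(password):
--     strength = []
--     vowels = 'aeiou'
--     for char in password:
--         if len(strength) == 0:
--             if char in vowels:
--                 strength.append([char, True, False])
--             else:
--                 strength.append([char, False, True])
--         elif strength[-1][1] is True and strength[-1][2] is True:
--             if char in vowels:
--                 strength.append([char, True, False])
--             else:
--                 strength.append([char, False, True])
--         elif strength[-1][1] is False and strength[-1][2] is True:
--             if char in vowels:
--                 strength[-1][0] += char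
--                 strength[-1][1] = True
--             else:
--                 strength[-1][0] += char
--         elif strength[-1][1] is True and strength[-1][2] is False:
--             if char in vowels:
--                 strength[-1][0] += char
--             else:
--                 strength[-1][0] += char
--                 strength[-1][2] = True
--
--     if strength[-1][1] is False or strength[-1][2] is False:
--         return len(strength) - 1
--     else:
--         return len(strength)
-- ===== SOURCE B (Python) =====
-- def passwordStrength2(password):
--     count = 0
--     has_vowel = False
--     has_consonant = False
--     for char in password:
--         if char in 'aeiou':
--             has_vowel = True
--         else:
--             has_consonant = True
--         if has_vowel and has_consonant:
--             count += 1
--             has_vowel = False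
--             has_consonant = False
--     return count
-- ===== Notes on version B (the rewrite author's own statement) =====
-- stated objective: simpler
-- what changed: Replaced A's list of [string, bool, bool] segment records (built by appending and mutating the last entry, then counting/adjusting at the end) with a flat one-pass state machine that keeps only a counter and two booleans and never builds any segments.
import Mathlib
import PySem

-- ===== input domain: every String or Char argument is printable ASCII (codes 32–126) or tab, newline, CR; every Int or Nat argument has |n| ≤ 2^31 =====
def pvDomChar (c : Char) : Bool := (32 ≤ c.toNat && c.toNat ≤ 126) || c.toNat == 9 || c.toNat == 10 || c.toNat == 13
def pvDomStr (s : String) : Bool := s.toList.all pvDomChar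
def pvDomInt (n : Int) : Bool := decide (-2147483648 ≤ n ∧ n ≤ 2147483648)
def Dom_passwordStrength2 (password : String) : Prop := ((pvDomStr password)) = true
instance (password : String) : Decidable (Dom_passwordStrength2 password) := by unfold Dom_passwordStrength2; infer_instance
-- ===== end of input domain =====

-- B replaces A's list of segment records with a flat counter + two booleans (O(1) space);
-- return values only. A raises IndexError on the empty password (excluded by Pre_); B returns 0 there.

-- ===== PORT A =====
-- A's `strength` list is kept in REVERSED order: Python's append-at-end is cons,
-- and strength[-1] is the head; only length and the last entry's flags are ever read.
def pvVowel (c : Char) : Bool := "aeiou".toList.contains c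

def pvStepA (st : List (String × Bool × Bool)) (char : Char) : List (String × Bool × Bool) :=
  match st with
  | [] =>
    if pvVowel char then [(String.singleton char, true, false)]
    else [(String.singleton char, false, true)]
  | (s, v, c) :: rest =>
    if v = true ∧ c = true then
      (if pvVowel char then (String.singleton char, true, false) :: st
       else (String.singleton char, false, true) :: st)
    else if v = false ∧ c = true then
      (if pvVowel char then (s.push char, true, c) :: rest
       else (s.push char, v, c) :: rest)
    else if v = true ∧ c = false then
      (if pvVowel char then (s.push char, v, c) :: rest
       else (s.push char, v, true) :: rest)
    else st

def passwordStrength2 (password : String) : Int :=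
  let strength := password.toList.foldl pvStepA []
  match strength with
  | [] => 0  -- unreachable under Pre_ (Python raises IndexError here)
  | (_, v, c) :: _ =>
    if v = false ∨ c = false then (strength.length : Int) - 1 else (strength.length : Int)

-- ===== PORT B =====
def pvStepB (st : Int × Bool × Bool) (char : Char) : Int × Bool × Bool :=
  let hv := if pvVowel char then true else st.2.1
  let hc := if pvVowel char then st.2.2 else true
  if hv && hc then (st.1 + 1, false, false) else (st.1, hv, hc)

def passwordStrength2_alt (password : String) : Int :=
  (password.toList.foldl pvStepB (0, false, false)).1

-- ===== PRECONDITION & SPEC =====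
-- Pre_ excludes only the empty password, on which A reads strength[-1] and raises IndexError.
def Pre_passwordStrength2 (password : String) : Prop := password ≠ ""
instance (password : String) : Decidable (Pre_passwordStrength2 password) := by
  unfold Pre_passwordStrength2; infer_instance

def pvWitness_passwordStrength2 : String := "ab"

def Spec_passwordStrength2 (password : String) (out : Int) : Prop := out = passwordStrength2_alt password
instance (password : String) (out : Int) : Decidable (Spec_passwordStrength2 password out) := by unfold Spec_passwordStrength2; infer_instance

-- ===== CLAIM (what is proved, stated in full; the proofs are below) =====
def Claim_equal_passwordStrength2 : Prop := ∀ (password : String), Dom_passwordStrength2 password → Pre_passwordStrength2 password → Spec_passwordStrength2 password (passwordStrength2 password)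
-- ===== LEMMAS AND PROOFS =====

-- Coupling invariant between A's (reversed) segment list and B's (count, has_vowel, has_consonant).
def pvR : List (String × Bool × Bool) → Int × Bool × Bool → Prop
  | [], (n, hv, hc) => n = 0 ∧ hv = false ∧ hc = false
  | ((_, v, c) :: rest), (n, hv, hc) =>
    if v && c then n = (rest.length : Int) + 1 ∧ hv = false ∧ hc = false
    else n = (rest.length : Int) ∧ hv = v ∧ hc = c ∧ (v || c) = true

lemma pvR_step (st : List (String × Bool × Bool)) (b : Int × Bool × Bool) (ch : Char)
    (h : pvR st b) : pvR (pvStepA st ch) (pvStepB b ch) := by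
  obtain ⟨n, hv, hc⟩ := b
  cases st with
  | nil =>
    obtain ⟨h1, h2, h3⟩ := h
    subst h1; subst h2; subst h3
    by_cases hvw : pvVowel ch = true <;> simp [pvStepA, pvStepB, pvR, hvw]
  | cons hd rest =>
    obtain ⟨s, v, c⟩ := hd
    cases v <;> cases c <;>
      simp only [pvR, Bool.and_self, Bool.and_false, Bool.false_and,
        if_true, Bool.false_or] at h
    · -- v = false, c = false: impossible
      simp at h
    · -- v = false, c = true
      obtain ⟨h1, h2, h3, _⟩ := h
      subst h1; subst h2; subst h3
      by_cases hvw : pvVowel ch = true <;>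
        simp [pvStepA, pvStepB, pvR, hvw]
    · -- v = true, c = false
      obtain ⟨h1, h2, h3, _⟩ := h
      subst h1; subst h2; subst h3
      by_cases hvw : pvVowel ch = true <;>
        simp [pvStepA, pvStepB, pvR, hvw]
    · -- v = true, c = true
      obtain ⟨h1, h2, h3⟩ := h
      subst h1; subst h2; subst h3
      by_cases hvw : pvVowel ch = true <;>
        simp [pvStepA, pvStepB, pvR, hvw]

lemma pvR_foldl (l : List Char) (st : List (String × Bool × Bool)) (b : Int × Bool × Bool)
    (h : pvR st b) : pvR (l.foldl pvStepA st) (l.foldl pvStepB b) := by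
  induction l generalizing st b with
  | nil => exact h
  | cons ch tl ih => exact ih _ _ (pvR_step st b ch h)

lemma pvStepA_ne_nil (st : List (String × Bool × Bool)) (ch : Char) : pvStepA st ch ≠ [] := by
  cases st with
  | nil => by_cases hvw : pvVowel ch = true <;> simp [pvStepA, hvw]
  | cons hd rest =>
    obtain ⟨s, v, c⟩ := hd
    simp only [pvStepA]
    split_ifs <;> simp

lemma pvFoldA_ne_nil (l : List Char) (st : List (String × Bool × Bool)) (h : st ≠ []) :
    l.foldl pvStepA st ≠ [] := by
  induction l generalizing st with
  | nil => exact h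
  | cons ch tl ih => exact ih _ (pvStepA_ne_nil st ch)

-- ===== VERDICT (by name: the statement is the Claim_ definition above) =====
theorem passwordStrength2_spec : Claim_equal_passwordStrength2 := by
  intro password _ hpre
  unfold Spec_passwordStrength2 passwordStrength2 passwordStrength2_alt
  have htl : password.toList ≠ [] := by
    intro h
    apply hpre
    simp [String.toList_eq_nil_iff] at h
    exact h
  have hR := pvR_foldl password.toList [] (0, false, false) (by simp [pvR])
  have hne : password.toList.foldl pvStepA [] ≠ [] := by
    cases hl : password.toList with
    | nil => exact absurd hl htl
    | cons ch tl =>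
      simp only [List.foldl_cons]
      exact pvFoldA_ne_nil tl _ (pvStepA_ne_nil [] ch)
  cases hst : password.toList.foldl pvStepA [] with
  | nil => exact absurd hst hne
  | cons hd rest =>
    obtain ⟨s, v, c⟩ := hd
    rw [hst] at hR
    cases v <;> cases c <;>
      simp only [pvR, Bool.and_self, Bool.and_false, Bool.false_and, reduceIte] at hR
    · simp at hR
    · simp [hR.1]
    · simp [hR.1]
    · simp [hR.1]
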